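-- pv_equiv track=rewrite | github.com/MrBrantCode/unitest_baseline | mut_generate/mist_train_taco/taco_5698/solution.py | max_gcd_for_banana_distribution
-- ===== SOURCE A (Python) =====
-- import math
--
-- def max_gcd_for_banana_distribution(N, K):
--     # Calculate the sum of the first K natural numbers
--     summ = K * (K + 1) // 2
--
--     # Check if the distribution is possible
--     if K > 44720 or summ > N:
--         return -1
--
--     # Find all factors of N
--     factors = []
--     for i in range(1, int(math.sqrt(N)) + 1):
--         if N % i == 0:
--             factors.append(i)
--             if i != N // i:
--                 factors.append(N // i)
--
--     # Sort factors in ascending order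
--     factors.sort()
--
--     # Find the maximum gcd that is greater than or equal to summ
--     for factor in factors:
--         if factor >= summ:
--             return N // factor
--
--     return -1
-- ===== SOURCE B (Python) =====
-- import math
--
-- def max_gcd_for_banana_distribution(N, K):
--     summ = K * (K + 1) // 2
--     if K > 44720 or summ > N:
--         return -1
--     # single pass: track the largest divisor g of N with g * summ <= N
--     # (equivalently N // g >= summ); no factor list, no sort, no second scan
--     best = -1
--     for i in range(1, math.isqrt(N) + 1):
--         if N % i == 0:
--             for g in (i, N // i):
--                 if g * summ <= N and g > best:
--                     best = g
--     return best
-- ===== Notes on version B (the rewrite author's own statement) =====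
-- stated objective: simpler
-- what changed: A builds the full factor list, sorts it, and scans for the first factor >= summ returning N//factor; B keeps no list at all and does one trial-division pass tracking the largest divisor g with g*summ <= N (the complementary divisor of A's answer), returning it directly.
import Mathlib
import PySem

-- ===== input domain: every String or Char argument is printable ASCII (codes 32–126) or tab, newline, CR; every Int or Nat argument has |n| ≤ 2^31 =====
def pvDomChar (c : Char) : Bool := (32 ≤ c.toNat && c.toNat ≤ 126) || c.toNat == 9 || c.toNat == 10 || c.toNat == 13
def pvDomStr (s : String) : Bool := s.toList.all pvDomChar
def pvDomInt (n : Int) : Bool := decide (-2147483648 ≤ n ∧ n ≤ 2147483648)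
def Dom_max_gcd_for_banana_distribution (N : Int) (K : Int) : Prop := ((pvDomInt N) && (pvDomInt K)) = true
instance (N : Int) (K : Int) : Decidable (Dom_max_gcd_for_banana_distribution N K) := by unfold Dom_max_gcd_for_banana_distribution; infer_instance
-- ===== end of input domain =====

-- B replaces A's build-all-factors / sort / scan-for-threshold pipeline by a single running-max
-- trial-division pass (track the largest divisor g with g*summ ≤ N); objective: simpler (no list,
-- no sort, one pass), same asymptotic cost.

-- ===== PORT A =====
-- int(math.sqrt(N)) is ported as Nat.sqrt N.toNat: exact for 0 ≤ N ≤ 2^31 (the guard ensures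
-- N ≥ summ ≥ 0 here, and for N in that range the correctly rounded double sqrt truncates to isqrt).
def max_gcd_for_banana_distribution (N : Int) (K : Int) : Int :=
  let summ := PySem.Int.floordiv (K * (K + 1)) 2
  if K > 44720 ∨ summ > N then -1
  else
    let factors := (PySem.List.pyRange 1 ((Nat.sqrt N.toNat : Int) + 1) 1).foldl
      (fun fs i =>
        if PySem.Int.mod N i = 0 then
          let fs := fs ++ [i]
          if i ≠ PySem.Int.floordiv N i then fs ++ [PySem.Int.floordiv N i] else fs
        else fs) []
    let factors := PySem.List.sorted factors (fun x => x) false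
    match factors.find? (fun f => decide (f ≥ summ)) with
    | some f => PySem.Int.floordiv N f
    | none => -1

-- ===== PORT B =====
def max_gcd_for_banana_distribution_alt (N : Int) (K : Int) : Int :=
  let summ := PySem.Int.floordiv (K * (K + 1)) 2
  if K > 44720 ∨ summ > N then -1
  else
    (PySem.List.pyRange 1 ((Nat.sqrt N.toNat : Int) + 1) 1).foldl
      (fun best i =>
        if PySem.Int.mod N i = 0 then
          [i, PySem.Int.floordiv N i].foldl
            (fun best g => if g * summ ≤ N ∧ g > best then g else best) best
        else best) (-1)

-- ===== PRECONDITION & SPEC =====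
def Spec_max_gcd_for_banana_distribution (N : Int) (K : Int) (out : Int) : Prop := out = max_gcd_for_banana_distribution_alt N K
instance (N : Int) (K : Int) (out : Int) : Decidable (Spec_max_gcd_for_banana_distribution N K out) := by unfold Spec_max_gcd_for_banana_distribution; infer_instance

-- ===== CLAIM (what is proved, stated in full; the proofs are below) =====
def Claim_equal_max_gcd_for_banana_distribution : Prop := ∀ (N : Int) (K : Int), Dom_max_gcd_for_banana_distribution N K → Spec_max_gcd_for_banana_distribution N K (max_gcd_for_banana_distribution N K)

-- ===== LEMMAS AND PROOFS =====

-- i ≤ isqrt N  ↔  i*i ≤ N, over Int (0 ≤ N, 0 < i)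
theorem pv_le_sqrt {N i : Int} (hN : 0 ≤ N) (hi : 0 < i) :
    i ≤ ((Nat.sqrt N.toNat : Nat) : Int) ↔ i * i ≤ N := by
  constructor
  · intro h
    have h1 : i.toNat ≤ Nat.sqrt N.toNat := by omega
    have h2 : i.toNat * i.toNat ≤ N.toNat := Nat.le_sqrt.mp h1
    have : ((i.toNat : Int)) * i.toNat ≤ (N.toNat : Int) := by exact_mod_cast h2
    rw [Int.toNat_of_nonneg hi.le, Int.toNat_of_nonneg hN] at this
    exact this
  · intro h
    have h2 : i.toNat * i.toNat ≤ N.toNat := by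
      have : (i.toNat : Int) * i.toNat ≤ (N.toNat : Int) := by
        rw [Int.toNat_of_nonneg hi.le, Int.toNat_of_nonneg hN]; exact h
      exact_mod_cast this
    have := Nat.le_sqrt.mpr h2
    omega

theorem pv_pair_pos {N : Int} (hN : 0 < N) {x i : Int}
    (hi : 0 < i) (hdvd : i ∣ N) (hx : x = i ∨ x = N / i) : 0 < x ∧ x ∣ N := by
  rcases hx with rfl | rfl
  · exact ⟨hi, hdvd⟩
  · have hix : N / i * i = N := Int.ediv_mul_cancel hdvd
    refine ⟨?_, ⟨i, hix.symm⟩⟩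
    nlinarith [hix]

theorem pv_pair_ex {N : Int} (hN : 0 < N) {x : Int} (hx : 0 < x) (hdvd : x ∣ N) :
    ∃ i, i ∈ PySem.List.pyRange 1 ((Nat.sqrt N.toNat : Int) + 1) 1 ∧ i ∣ N ∧
      (x = i ∨ (x = N / i ∧ i ≠ N / i)) := by
  have hxle : x ≤ N := Int.le_of_dvd hN hdvd
  by_cases hsq : x * x ≤ N
  · exact ⟨x, PySem.List.mem_pyRange_one.mpr ⟨hx, by
      have := (pv_le_sqrt hN.le hx).mpr hsq; omega⟩, hdvd, Or.inl rfl⟩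
  · push Not at hsq
    set i := N / x with hidef
    have hix : i * x = N := Int.ediv_mul_cancel hdvd
    have hipos : 0 < i := by
      rcases lt_or_ge 0 i with h | h
      · exact h
      · exfalso; nlinarith
    have hilt : i < x := by nlinarith
    have hidvd : i ∣ N := ⟨x, hix.symm⟩
    have hNx : N / i = x := by
      rw [← hix]; exact Int.mul_ediv_cancel_left x (by omega)
    refine ⟨i, PySem.List.mem_pyRange_one.mpr ⟨hipos, by
      have hii : i * i ≤ N := by nlinarith
      have := (pv_le_sqrt hN.le hipos).mpr hii; omega⟩, hidvd,
      Or.inr ⟨hNx.symm, by omega⟩⟩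

-- first element ≥ s in a (≤)-sorted list is the minimum element ≥ s
theorem pv_find_sorted {l : List Int} (hp : l.Pairwise (· ≤ ·)) (s : Int) :
    (∀ d, l.find? (fun f => decide (f ≥ s)) = some d →
        d ∈ l ∧ s ≤ d ∧ ∀ x ∈ l, s ≤ x → d ≤ x) ∧
    (l.find? (fun f => decide (f ≥ s)) = none → ∀ x ∈ l, ¬ s ≤ x) := by
  induction l with
  | nil => simp
  | cons a t ih =>
    obtain ⟨ha, ht⟩ := List.pairwise_cons.mp hp
    obtain ⟨ih1, ih2⟩ := ih ht
    by_cases h : s ≤ a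
    · rw [List.find?_cons_of_pos (h := by simpa using h)]
      refine ⟨?_, by simp⟩
      intro d hd
      injection hd with hd; subst hd
      refine ⟨List.mem_cons_self, h, ?_⟩
      intro x hx _
      rcases List.mem_cons.mp hx with rfl | hx
      · exact le_refl _
      · exact ha x hx
    · rw [List.find?_cons_of_neg (h := by simpa using h)]
      constructor
      · intro d hd
        obtain ⟨hmem, hsd, hmin⟩ := ih1 d hd
        refine ⟨List.mem_cons_of_mem _ hmem, hsd, ?_⟩
        intro x hx hsx
        rcases List.mem_cons.mp hx with rfl | hx
        · exact absurd hsx h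
        · exact hmin x hx hsx
      · intro hnone x hx
        rcases List.mem_cons.mp hx with rfl | hx
        · exact h
        · exact ih2 hnone x hx

-- running-max fold characterisation
theorem pv_fold_max (N s : Int) (l : List Int) (init : Int) :
    (l.foldl (fun b g => if g * s ≤ N ∧ g > b then g else b) init = init ∨
      (l.foldl (fun b g => if g * s ≤ N ∧ g > b then g else b) init ∈ l ∧
       (l.foldl (fun b g => if g * s ≤ N ∧ g > b then g else b) init) * s ≤ N)) ∧
    init ≤ l.foldl (fun b g => if g * s ≤ N ∧ g > b then g else b) init ∧
    ∀ g ∈ l, g * s ≤ N → g ≤ l.foldl (fun b g => if g * s ≤ N ∧ g > b then g else b) init := by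
  induction l generalizing init with
  | nil => simp
  | cons a t ih =>
    simp only [List.foldl_cons]
    obtain ⟨ih1, ih2, ih3⟩ := ih (if a * s ≤ N ∧ a > init then a else init)
    by_cases h : a * s ≤ N ∧ a > init
    · rw [if_pos h] at ih1 ih2 ih3 ⊢
      refine ⟨?_, le_trans h.2.le ih2, ?_⟩
      · rcases ih1 with heq | ⟨hm, hle⟩
        · exact Or.inr ⟨by rw [heq]; exact List.mem_cons_self, by rw [heq]; exact h.1⟩
        · exact Or.inr ⟨List.mem_cons_of_mem _ hm, hle⟩
      · intro g hg hgs
        rcases List.mem_cons.mp hg with rfl | hg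
        · exact ih2
        · exact ih3 g hg hgs
    · rw [if_neg h] at ih1 ih2 ih3 ⊢
      refine ⟨?_, ih2, ?_⟩
      · rcases ih1 with heq | ⟨hm, hle⟩
        · exact Or.inl heq
        · exact Or.inr ⟨List.mem_cons_of_mem _ hm, hle⟩
      · intro g hg hgs
        rcases List.mem_cons.mp hg with rfl | hg
        · rcases not_and_or.mp h with h1 | h1
          · exact absurd hgs h1
          · exact le_trans (by omega) ih2
        · exact ih3 g hg hgs

-- nested fold over generated sublists = fold over the flatMap
theorem pv_foldl_flatMap {α β γ : Type} (g : β → List γ) (f : α → γ → α) (l : List β) (init : α) :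
    l.foldl (fun b i => (g i).foldl f b) init = (l.flatMap g).foldl f init := by
  induction l generalizing init with
  | nil => simp
  | cons a t ih => simp [List.foldl_append, ih]

-- the else-branch of both ports, with the summ value abstracted as s
theorem pv_main (N s : Int) (hs0 : 0 ≤ s) (hsN : s ≤ N) :
    (match
      List.find? (fun f => decide (f ≥ s))
        (PySem.List.sorted
          (List.foldl
            (fun fs i =>
              if PySem.Int.mod N i = 0 then
                if i ≠ PySem.Int.floordiv N i then fs ++ [i] ++ [PySem.Int.floordiv N i] else fs ++ [i]
              else fs)
            [] (PySem.List.pyRange 1 (↑N.toNat.sqrt + 1)))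
          fun x => x) with
    | some f => PySem.Int.floordiv N f
    | none => -1) =
    List.foldl
      (fun best i =>
        if PySem.Int.mod N i = 0 then
          List.foldl (fun best g => if g * s ≤ N ∧ g > best then g else best) best
            [i, PySem.Int.floordiv N i]
        else best)
      (-1) (PySem.List.pyRange 1 (↑N.toNat.sqrt + 1)) := by
  by_cases hN0 : N = 0
  · subst hN0
    norm_num [PySem.List.pyRange_one_eq_nil (by norm_num : (1:Int) ≥ 1),
      PySem.List.sorted]
  have hN : 0 < N := by omega
  -- A's loop builds the flatMap of per-i factor lists
  have hA : (List.foldl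
      (fun fs i =>
        if PySem.Int.mod N i = 0 then
          if i ≠ PySem.Int.floordiv N i then fs ++ [i] ++ [PySem.Int.floordiv N i] else fs ++ [i]
        else fs)
      ([] : List Int) (PySem.List.pyRange 1 (↑N.toNat.sqrt + 1))) =
      (PySem.List.pyRange 1 (↑N.toNat.sqrt + 1)).flatMap
        (fun i => if PySem.Int.mod N i = 0 then
            (if i ≠ PySem.Int.floordiv N i then [i, PySem.Int.floordiv N i] else [i]) else []) := by
    have := PySem.List.foldl_append_eq_flatMap
      (fun i => if PySem.Int.mod N i = 0 then
          (if i ≠ PySem.Int.floordiv N i then [i, PySem.Int.floordiv N i] else [i]) else [])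
      (PySem.List.pyRange 1 (↑N.toNat.sqrt + 1)) []
    rw [show (List.foldl
        (fun fs i =>
          if PySem.Int.mod N i = 0 then
            if i ≠ PySem.Int.floordiv N i then fs ++ [i] ++ [PySem.Int.floordiv N i] else fs ++ [i]
          else fs)
        ([] : List Int) (PySem.List.pyRange 1 (↑N.toNat.sqrt + 1))) = (List.foldl
        (fun fs i => fs ++ (if PySem.Int.mod N i = 0 then
            (if i ≠ PySem.Int.floordiv N i then [i, PySem.Int.floordiv N i] else [i]) else []))
        ([] : List Int) (PySem.List.pyRange 1 (↑N.toNat.sqrt + 1)))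
      from by congr 1; funext fs i; split_ifs <;> simp]
    simpa using this
  -- B's loop is the running-max fold over the flatMap of candidate pairs
  have hB : (List.foldl
      (fun best i =>
        if PySem.Int.mod N i = 0 then
          List.foldl (fun best g => if g * s ≤ N ∧ g > best then g else best) best
            [i, PySem.Int.floordiv N i]
        else best)
      (-1) (PySem.List.pyRange 1 (↑N.toNat.sqrt + 1))) =
      ((PySem.List.pyRange 1 (↑N.toNat.sqrt + 1)).flatMap
          (fun i => if PySem.Int.mod N i = 0 then [i, PySem.Int.floordiv N i] else [])).foldl
        (fun b g => if g * s ≤ N ∧ g > b then g else b) (-1) := by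
    rw [← pv_foldl_flatMap]
    congr 1
    funext b i
    split_ifs <;> simp
  rw [hA, hB]
  have hfd : ∀ i : Int, 0 < i → PySem.Int.floordiv N i = N / i :=
    fun i hi => PySem.Int.floordiv_eq_ediv_of_pos hi
  have hmemA : ∀ x, x ∈ List.flatMap
      (fun i => if PySem.Int.mod N i = 0 then
          (if i ≠ PySem.Int.floordiv N i then [i, PySem.Int.floordiv N i] else [i]) else [])
      (PySem.List.pyRange 1 (↑N.toNat.sqrt + 1)) ↔ (0 < x ∧ x ∣ N) := by
    intro x
    simp only [List.mem_flatMap]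
    constructor
    · rintro ⟨i, hiR, hx⟩
      obtain ⟨hi1, hi2⟩ := PySem.List.mem_pyRange_one.mp hiR
      have hi : (0:Int) < i := hi1
      rw [hfd i hi] at hx
      by_cases hm : PySem.Int.mod N i = 0
      · have hdvd : i ∣ N := (PySem.Int.mod_eq_zero_iff_dvd N i).mp hm
        rw [if_pos hm] at hx
        refine pv_pair_pos hN hi hdvd ?_
        by_cases hne : i ≠ N / i
        · rw [if_pos hne] at hx; simpa using hx
        · rw [if_neg hne] at hx; simp at hx; exact Or.inl hx
      · rw [if_neg hm] at hx; simp at hx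
    · rintro ⟨hx, hdvd⟩
      obtain ⟨i, hiR, hidvd, hcase⟩ := pv_pair_ex hN hx hdvd
      obtain ⟨hi1, _⟩ := PySem.List.mem_pyRange_one.mp hiR
      have hi : (0:Int) < i := hi1
      refine ⟨i, hiR, ?_⟩
      rw [hfd i hi, if_pos ((PySem.Int.mod_eq_zero_iff_dvd N i).mpr hidvd)]
      rcases hcase with rfl | ⟨rfl, hne⟩
      · split_ifs <;> simp
      · rw [if_pos hne]; simp
  have hmemC : ∀ x, x ∈ List.flatMap
      (fun i => if PySem.Int.mod N i = 0 then [i, PySem.Int.floordiv N i] else [])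
      (PySem.List.pyRange 1 (↑N.toNat.sqrt + 1)) ↔ (0 < x ∧ x ∣ N) := by
    intro x
    simp only [List.mem_flatMap]
    constructor
    · rintro ⟨i, hiR, hx⟩
      obtain ⟨hi1, hi2⟩ := PySem.List.mem_pyRange_one.mp hiR
      have hi : (0:Int) < i := hi1
      rw [hfd i hi] at hx
      by_cases hm : PySem.Int.mod N i = 0
      · have hdvd : i ∣ N := (PySem.Int.mod_eq_zero_iff_dvd N i).mp hm
        rw [if_pos hm] at hx
        exact pv_pair_pos hN hi hdvd (by simpa using hx)
      · rw [if_neg hm] at hx; simp at hx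
    · rintro ⟨hx, hdvd⟩
      obtain ⟨i, hiR, hidvd, hcase⟩ := pv_pair_ex hN hx hdvd
      obtain ⟨hi1, _⟩ := PySem.List.mem_pyRange_one.mp hiR
      have hi : (0:Int) < i := hi1
      refine ⟨i, hiR, ?_⟩
      rw [hfd i hi, if_pos ((PySem.Int.mod_eq_zero_iff_dvd N i).mpr hidvd)]
      rcases hcase with rfl | ⟨rfl, hne⟩ <;> simp
  set FA := List.flatMap
      (fun i => if PySem.Int.mod N i = 0 then
          (if i ≠ PySem.Int.floordiv N i then [i, PySem.Int.floordiv N i] else [i]) else [])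
      (PySem.List.pyRange 1 (↑N.toNat.sqrt + 1)) with hFA
  set C := List.flatMap
      (fun i => if PySem.Int.mod N i = 0 then [i, PySem.Int.floordiv N i] else [])
      (PySem.List.pyRange 1 (↑N.toNat.sqrt + 1)) with hC
  set b := List.foldl (fun b g => if g * s ≤ N ∧ g > b then g else b) (-1) C with hbdef
  have hps : (PySem.List.sorted FA (fun x => x) false).Pairwise (· ≤ ·) := by
    simpa using PySem.List.sorted_pairwise FA (fun x => x)
  obtain ⟨hfind1, hfind2⟩ := pv_find_sorted hps s
  have hNS : N ∈ PySem.List.sorted FA (fun x => x) false :=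
    (PySem.List.mem_sorted _ _ _ _).mpr ((hmemA N).mpr ⟨hN, dvd_refl N⟩)
  cases hfo : List.find? (fun f => decide (f ≥ s)) (PySem.List.sorted FA fun x => x) with
  | none => exact absurd hsN (hfind2 hfo N hNS)
  | some d =>
    show PySem.Int.floordiv N d = b
    obtain ⟨hdS, hsd, hmin⟩ := hfind1 d hfo
    obtain ⟨hdpos, hddvd⟩ := (hmemA d).mp ((PySem.List.mem_sorted _ _ _ _).mp hdS)
    have hqd : N / d * d = N := Int.ediv_mul_cancel hddvd
    have hqpos : 0 < N / d := by
      rcases lt_or_ge 0 (N / d) with h | h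
      · exact h
      · exfalso; nlinarith
    have hqdvd : N / d ∣ N := ⟨d, hqd.symm⟩
    obtain ⟨hb1, hb2, hb3⟩ := pv_fold_max N s C (-1)
    have hqC : N / d ∈ C := (hmemC _).mpr ⟨hqpos, hqdvd⟩
    have hqs : N / d * s ≤ N := by nlinarith
    have hqb : N / d ≤ b := hb3 _ hqC hqs
    have hbpos : 0 < b := lt_of_lt_of_le hqpos hqb
    rcases hb1 with heq | ⟨hbC, hbs⟩
    · rw [← hbdef] at heq; omega
    obtain ⟨hbp, hbdvd⟩ := (hmemC b).mp hbC
    have hbb : N / b * b = N := Int.ediv_mul_cancel hbdvd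
    have hNbpos : 0 < N / b := by
      rcases lt_or_ge 0 (N / b) with h | h
      · exact h
      · exfalso; nlinarith
    have hsNb : s ≤ N / b := le_of_mul_le_mul_right (by nlinarith) hbp
    have hNbS : N / b ∈ PySem.List.sorted FA (fun x => x) false :=
      (PySem.List.mem_sorted _ _ _ _).mpr ((hmemA _).mpr ⟨hNbpos, ⟨b, hbb.symm⟩⟩)
    have hdNb : d ≤ N / b := hmin _ hNbS hsNb
    have hbq : b ≤ N / d := by
      rw [Int.le_ediv_iff_mul_le hdpos]; nlinarith
    rw [hfd d hdpos]
    omega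

-- ===== VERDICT (by name: the statement is the Claim_ definition above) =====
theorem max_gcd_for_banana_distribution_spec : Claim_equal_max_gcd_for_banana_distribution := by
  intro N K _
  unfold Spec_max_gcd_for_banana_distribution
  by_cases hg : K > 44720 ∨ PySem.Int.floordiv (K * (K + 1)) 2 > N
  · simp only [max_gcd_for_banana_distribution, max_gcd_for_banana_distribution_alt, if_pos hg]
  · simp only [max_gcd_for_banana_distribution, max_gcd_for_banana_distribution_alt, if_neg hg]
    push Not at hg
    have hKK : 0 ≤ K * (K + 1) := by
      rcases lt_or_ge K 0 with h | h
      · nlinarith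
      · nlinarith
    have hs0 : 0 ≤ PySem.Int.floordiv (K * (K + 1)) 2 :=
      (PySem.Int.le_floordiv_iff_mul_le (by norm_num)).mpr (by omega)
    exact pv_main N _ hs0 hg.2
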